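-- pv_equiv track=rewrite | github.com/k3nju/security-research-tools | tools/calltrace/gen_trace.py | suppress_callstack
-- ===== SOURCE A (Python) =====
-- SUPPRESS_DLLS = [
-- 	# system
-- 	"ntdll.dll",
-- 	"user32.dll",
-- 	"comdlg32.dll",
-- 	"comctl32.dll",
-- 	"gdi32.dll",
-- 	"msvcrt.dll",
-- 	"msvcr90.dll",
-- 	"windowscodecs.dll",
-- 	"shell32.dll",
-- 	"kernelbase.dll",
-- 	"kernel32.dll",
-- 	"ole32.dll",
-- 	"sysfer.dll",
--
-- 	# others
-- 	"libsvn_tsvn32.dll",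
-- 	];
--
-- def suppress_callstack(callstack):
-- 	suppressed = [];
-- 	prev = None;
-- 	registered = False
--
-- 	for elem in callstack:
-- 		mod_name, call_addr, ret_addr = elem;
-- 		if mod_name in SUPPRESS_DLLS and prev == mod_name:
-- 			if registered == False:
-- 				suppressed.append((mod_name, 0, 0));
-- 				registered = True
-- 			continue;
-- 		registered = False
-- 		prev = mod_name;
-- 		suppressed.append((mod_name, call_addr, ret_addr));
--
-- 	return suppressed;
-- ===== SOURCE B (Python) =====
-- from itertools import groupby
--
-- SUPPRESS_DLLS = [
-- 	# system
-- 	"ntdll.dll",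
-- 	"user32.dll",
-- 	"comdlg32.dll",
-- 	"comctl32.dll",
-- 	"gdi32.dll",
-- 	"msvcrt.dll",
-- 	"msvcr90.dll",
-- 	"windowscodecs.dll",
-- 	"shell32.dll",
-- 	"kernelbase.dll",
-- 	"kernel32.dll",
-- 	"ole32.dll",
-- 	"sysfer.dll",
--
-- 	# others
-- 	"libsvn_tsvn32.dll",
-- 	]
--
-- def suppress_callstack(callstack):
-- 	out = []
-- 	for mod, group in groupby(callstack, key=lambda e: e[0]):
-- 		frames = []
-- 		for e in group:
-- 			m, call_addr, ret_addr = e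
-- 			frames.append((m, call_addr, ret_addr))
-- 		if mod in SUPPRESS_DLLS and len(frames) >= 2:
-- 			out.append(frames[0])
-- 			out.append((mod, 0, 0))
-- 		else:
-- 			out.extend(frames)
-- 	return out
-- ===== Notes on version B (the rewrite author's own statement) =====
-- stated objective: simpler
-- what changed: Replaced A's prev/registered state machine with itertools.groupby: split the stack into maximal runs of equal module names, then emit each run whole, or its first frame plus a (mod,0,0) marker when the module is suppressed and the run has length >= 2.
import Mathlib
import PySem

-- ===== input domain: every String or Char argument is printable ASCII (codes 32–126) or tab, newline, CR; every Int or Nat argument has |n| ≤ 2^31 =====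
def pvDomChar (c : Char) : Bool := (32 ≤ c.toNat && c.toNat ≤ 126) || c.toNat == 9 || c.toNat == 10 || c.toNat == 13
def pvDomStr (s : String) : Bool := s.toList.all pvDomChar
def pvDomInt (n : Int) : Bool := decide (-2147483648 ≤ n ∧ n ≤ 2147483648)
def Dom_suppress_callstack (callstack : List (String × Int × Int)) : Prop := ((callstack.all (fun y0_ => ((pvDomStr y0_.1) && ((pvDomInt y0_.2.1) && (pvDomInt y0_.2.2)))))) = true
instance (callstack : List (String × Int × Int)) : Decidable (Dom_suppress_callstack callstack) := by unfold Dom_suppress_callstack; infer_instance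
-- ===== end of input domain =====

-- B replaces A's prev/registered state machine by grouping the stack into maximal
-- runs of equal module names and mapping each run (objective: simpler decomposition).

-- ===== PORT A =====
def SUPPRESS_DLLS : List String :=
  ["ntdll.dll", "user32.dll", "comdlg32.dll", "comctl32.dll", "gdi32.dll",
   "msvcrt.dll", "msvcr90.dll", "windowscodecs.dll", "shell32.dll",
   "kernelbase.dll", "kernel32.dll", "ole32.dll", "sysfer.dll",
   "libsvn_tsvn32.dll"]

-- literal port of A's loop: state = (suppressed, prev, registered)
def suppress_callstack (callstack : List (String × Int × Int)) : List (String × Int × Int) :=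
  (callstack.foldl
    (fun (st : List (String × Int × Int) × Option String × Bool) elem =>
      let (mod_name, call_addr, ret_addr) := elem
      if mod_name ∈ SUPPRESS_DLLS ∧ st.2.1 = some mod_name then
        if st.2.2 = false then (st.1 ++ [(mod_name, 0, 0)], st.2.1, true)
        else st
      else (st.1 ++ [(mod_name, call_addr, ret_addr)], some mod_name, false))
    ([], none, false)).1

-- ===== PORT B =====
-- itertools.groupby(callstack, key=lambda e: e[0]) : maximal runs of equal module names
def groupRuns : List (String × Int × Int) → List (List (String × Int × Int))
  | [] => []
  | (m, c, r) :: rest =>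
    ((m, c, r) :: rest.takeWhile (fun x => x.1 == m)) :: groupRuns (rest.dropWhile (fun x => x.1 == m))
termination_by l => l.length
decreasing_by
  simpa using Nat.lt_succ_of_le (List.length_dropWhile_le _ rest)

-- the per-group body of B's loop (unpack each frame; collapse long suppressed runs)
def emitGroup (g : List (String × Int × Int)) : List (String × Int × Int) :=
  match g with
  | [] => []
  | (m, c, r) :: tl =>
    if m ∈ SUPPRESS_DLLS ∧ 2 ≤ ((m, c, r) :: tl).length then [(m, c, r), (m, 0, 0)]
    else (m, c, r) :: tl

def suppress_callstack_alt (callstack : List (String × Int × Int)) : List (String × Int × Int) :=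
  (groupRuns callstack).flatMap emitGroup

-- ===== PRECONDITION & SPEC =====
def Spec_suppress_callstack (callstack : List (String × Int × Int)) (out : List (String × Int × Int)) : Prop := out = suppress_callstack_alt callstack
instance (callstack : List (String × Int × Int)) (out : List (String × Int × Int)) : Decidable (Spec_suppress_callstack callstack out) := by unfold Spec_suppress_callstack; infer_instance

-- ===== CLAIM (what is proved, stated in full; the proofs are below) =====
def Claim_equal_suppress_callstack : Prop := ∀ (callstack : List (String × Int × Int)), Dom_suppress_callstack callstack → Spec_suppress_callstack callstack (suppress_callstack callstack)

-- ===== LEMMAS AND PROOFS =====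

-- A's loop, written as a structural recursion producing the emitted suffix
def loopRec : List (String × Int × Int) → Option String → Bool → List (String × Int × Int)
  | [], _, _ => []
  | (m, c, r) :: rest, prev, reg =>
    if m ∈ SUPPRESS_DLLS ∧ prev = some m then
      if reg = false then (m, 0, 0) :: loopRec rest prev true
      else loopRec rest prev reg
    else (m, c, r) :: loopRec rest (some m) false

theorem loopRec_cons_not (m : String) (c r : Int) (rest : List (String × Int × Int))
    (p : Option String) (g : Bool) (h : ¬ (m ∈ SUPPRESS_DLLS ∧ p = some m)) :
    loopRec ((m, c, r) :: rest) p g = (m, c, r) :: loopRec rest (some m) false := by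
  simp only [loopRec]
  rw [if_neg h]

theorem loopRec_cons_reg (m : String) (c r : Int) (rest : List (String × Int × Int))
    (hm : m ∈ SUPPRESS_DLLS) :
    loopRec ((m, c, r) :: rest) (some m) false = (m, 0, 0) :: loopRec rest (some m) true := by
  simp only [loopRec]
  rw [if_pos (⟨hm, trivial⟩ : _ ∧ True)]
  simp

theorem loopRec_cons_skip (m : String) (c r : Int) (rest : List (String × Int × Int))
    (hm : m ∈ SUPPRESS_DLLS) :
    loopRec ((m, c, r) :: rest) (some m) true = loopRec rest (some m) true := by
  simp only [loopRec]
  rw [if_pos (⟨hm, trivial⟩ : _ ∧ True)]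
  simp

theorem foldl_eq_loopRec (xs : List (String × Int × Int)) :
    ∀ (acc : List (String × Int × Int)) (p : Option String) (r : Bool),
    (xs.foldl
      (fun (st : List (String × Int × Int) × Option String × Bool) elem =>
        let (mod_name, call_addr, ret_addr) := elem
        if mod_name ∈ SUPPRESS_DLLS ∧ st.2.1 = some mod_name then
          if st.2.2 = false then (st.1 ++ [(mod_name, 0, 0)], st.2.1, true)
          else st
        else (st.1 ++ [(mod_name, call_addr, ret_addr)], some mod_name, false))
      (acc, p, r)).1 = acc ++ loopRec xs p r := by
  induction xs with
  | nil => intro acc p r; simp [loopRec]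
  | cons e rest ih =>
    intro acc p r
    obtain ⟨m, c, rr⟩ := e
    simp only [List.foldl_cons, loopRec]
    by_cases h1 : m ∈ SUPPRESS_DLLS ∧ p = some m
    · by_cases h2 : r = false
      · obtain ⟨h1a, h1b⟩ := h1
        subst h1b h2
        simp [h1a, ih]
      · obtain ⟨h1a, h1b⟩ := h1
        subst h1b
        simp [h1a, h2, ih]
    · simp [h1, ih]

-- a suppressed run with registered = true is skipped entirely
theorem loopRec_skip (m : String) (hm : m ∈ SUPPRESS_DLLS) :
    ∀ (run ys : List (String × Int × Int)), (∀ e ∈ run, e.1 = m) →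
    loopRec (run ++ ys) (some m) true = loopRec ys (some m) true := by
  intro run
  induction run with
  | nil => intro ys _; simp
  | cons e tl ih =>
    intro ys h
    obtain ⟨m', c, r⟩ := e
    have hm' : m' = m := h (m', c, r) (by simp)
    subst hm'
    rw [List.cons_append, loopRec_cons_skip m' c r _ hm]
    exact ih ys (fun e he => h e (by simp [he]))

-- a non-suppressed run is copied verbatim
theorem loopRec_copy (m : String) (hm : m ∉ SUPPRESS_DLLS) :
    ∀ (run ys : List (String × Int × Int)), (∀ e ∈ run, e.1 = m) →
    loopRec (run ++ ys) (some m) false = run ++ loopRec ys (some m) false := by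
  intro run
  induction run with
  | nil => intro ys _; simp
  | cons e tl ih =>
    intro ys h
    obtain ⟨m', c, r⟩ := e
    have hm' : m' = m := h (m', c, r) (by simp)
    subst hm'
    rw [List.cons_append, loopRec_cons_not m' c r _ _ _ (fun hc => hm hc.1)]
    rw [ih ys (fun e he => h e (by simp [he]))]
    rfl

-- when the next module differs from prev, the carried state is irrelevant
theorem loopRec_headDiff (e : String × Int × Int) (tl : List (String × Int × Int))
    (m : String) (g : Bool) (h : e.1 ≠ m) :
    loopRec (e :: tl) (some m) g = loopRec (e :: tl) none false := by
  obtain ⟨m', c, rr⟩ := e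
  have hc : ¬ (m' ∈ SUPPRESS_DLLS ∧ (some m : Option String) = some m') := by
    rintro ⟨-, hh⟩; exact h (by simpa using hh.symm)
  rw [loopRec_cons_not m' c rr tl (some m) g hc,
    loopRec_cons_not m' c rr tl none false (by simp)]

theorem loopRec_eq_flatMap (xs : List (String × Int × Int)) :
    loopRec xs none false = (groupRuns xs).flatMap emitGroup := by
  match xs with
  | [] => simp [loopRec, groupRuns]
  | (m, c, r) :: rest =>
    obtain ⟨run, hrun⟩ : ∃ l, rest.takeWhile (fun x => x.1 == m) = l := ⟨_, rfl⟩
    obtain ⟨rest', hrest'⟩ : ∃ l, rest.dropWhile (fun x => x.1 == m) = l := ⟨_, rfl⟩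
    have hsplit : run ++ rest' = rest := by
      rw [← hrun, ← hrest']; exact List.takeWhile_append_dropWhile
    have hrunall : ∀ e ∈ run, e.1 = m := by
      intro e he
      have hmem : e ∈ rest.takeWhile (fun x => x.1 == m) := by rw [hrun]; exact he
      exact eq_of_beq (List.mem_takeWhile_imp (p := fun x : String × Int × Int => x.1 == m) hmem)
    have ihdrop := loopRec_eq_flatMap rest'
    have hdrop : ∀ b : Bool, loopRec rest' (some m) b = (groupRuns rest').flatMap emitGroup := by
      intro b
      rcases hr' : rest' with _ | ⟨e', tl'⟩
      · simp [loopRec, groupRuns]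
      · have hne : e'.1 ≠ m := by
          have h2 := List.head?_dropWhile_not (fun x => x.1 == m) rest
          rw [hrest', hr'] at h2
          simpa using h2
        rw [loopRec_headDiff e' tl' m b hne, ← hr', ihdrop]
    have hstep : loopRec ((m, c, r) :: rest) none false
        = (m, c, r) :: loopRec (run ++ rest') (some m) false := by
      rw [loopRec_cons_not m c r rest none false (by simp), ← hsplit]
    rw [hstep, groupRuns, hrun, hrest', List.flatMap_cons]
    by_cases hm : m ∈ SUPPRESS_DLLS
    · rcases run with _ | ⟨⟨m0, c0, r0⟩, run'⟩
      · rw [List.nil_append, hdrop false]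
        simp [emitGroup, hm]
      · have hm0 : m0 = m := hrunall (m0, c0, r0) (by simp)
        subst hm0
        rw [List.cons_append, loopRec_cons_reg m0 c0 r0 _ hm,
          loopRec_skip m0 hm run' rest' (fun e he => hrunall e (by simp [he])),
          hdrop true]
        simp only [emitGroup]
        rw [if_pos ⟨hm, by simp⟩]
        simp
    · rw [loopRec_copy m hm run rest' hrunall, hdrop false]
      simp only [emitGroup]
      rw [if_neg (fun hc => hm hc.1)]
      simp
termination_by xs.length
decreasing_by
  simpa [← hrest'] using Nat.lt_succ_of_le (List.length_dropWhile_le (fun x => x.1 == m) rest)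

-- ===== VERDICT (by name: the statement is the Claim_ definition above) =====
theorem suppress_callstack_spec : Claim_equal_suppress_callstack := by
  intro callstack _
  unfold Spec_suppress_callstack suppress_callstack suppress_callstack_alt
  rw [foldl_eq_loopRec, loopRec_eq_flatMap]
  simp
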